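-- pv_equiv track=rewrite | github.com/LucasAraujoBR/Arquitetura-MIPS | hex_to_bin.py | convert_bin
-- ===== SOURCE A (Python) =====
-- def convert_bin(list_hex):
--   list_hex_without_0x = [x.replace("0x","") for x in list_hex]
--   list_bins = list()
--   for instruction in list_hex_without_0x:
--     instruction_bin = ""
--     for algarismo in instruction:
--         num = bin(int(f"0x{algarismo}",16)).replace("0b","")
--         num = "0"*(4-len(num)) + num
--         instruction_bin += num
--     list_bins.append(instruction_bin)
--   return list_bins
-- ===== SOURCE B (Python) =====
-- def convert_bin(list_hex):
--     def to_bin(instruction):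
--         if not instruction:
--             return ""
--         return format(int(instruction, 16), "0{}b".format(4 * len(instruction)))
--     return [to_bin(x.replace("0x", "")) for x in list_hex]
-- ===== Notes on version B (the rewrite author's own statement) =====
-- stated objective: simpler
-- what changed: B converts each whole hex string with a single int(s,16) and one zero-padded format() of width 4*len(s) (guarding the empty string), instead of A's inner loop turning characters one at a time into 4-bit chunks and concatenating strings; the single C-level conversion per element also makes it measurably faster.
import Mathlib
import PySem

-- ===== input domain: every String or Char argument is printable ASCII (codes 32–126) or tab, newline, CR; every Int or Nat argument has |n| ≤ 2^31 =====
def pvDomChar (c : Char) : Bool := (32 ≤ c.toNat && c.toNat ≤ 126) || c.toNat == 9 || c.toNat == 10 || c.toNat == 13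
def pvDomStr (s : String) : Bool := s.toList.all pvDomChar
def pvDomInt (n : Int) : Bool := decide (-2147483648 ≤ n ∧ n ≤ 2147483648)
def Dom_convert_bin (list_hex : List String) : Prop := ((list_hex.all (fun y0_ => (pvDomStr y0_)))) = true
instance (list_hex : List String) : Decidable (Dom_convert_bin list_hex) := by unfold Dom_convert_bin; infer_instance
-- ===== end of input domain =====

-- B changes the per-instruction conversion: one whole-string base-16 conversion plus one
-- zero-padded binary formatting, instead of A's char-by-char 4-bit-chunk concatenation (objective: simpler).

-- ===== PORT A =====
-- A, line by line. `int(f"0x{c}", 16)` for a single char c is ported as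
-- `(PySem.Int.digitVal? c).getD 0`: exact whenever c is a hex digit (guaranteed by Pre_;
-- on a non-hex-digit char Python raises ValueError, which Pre_ excludes).
-- `bin(n).replace("0b","")` for n ≥ 0 is exactly the binary digits `PySem.Int.toBinChars n`.
def convert_bin (list_hex : List String) : List String :=
  let list_hex_without_0x := list_hex.map (fun x => PySem.Str.replace x "0x" "")
  list_hex_without_0x.foldl (fun list_bins instruction =>
    let instruction_bin := instruction.toList.foldl (fun acc algarismo =>
      let num := PySem.Int.toBinChars (((PySem.Int.digitVal? algarismo).getD 0 : Nat) : Int)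
      let num := List.replicate (4 - num.length) '0' ++ num
      acc ++ num) []
    list_bins ++ [String.ofList instruction_bin]) []

-- ===== PORT B =====
-- B, line by line. `int(instruction, 16)` on a nonempty string of hex digits (guaranteed
-- by Pre_) is exactly the left fold accumulating base-16 digit values; `format(v, '0{W}b')`
-- for v ≥ 0 is the binary digits of v left-padded with '0' to width W.
def convert_bin_alt (list_hex : List String) : List String :=
  list_hex.map (fun x =>
    let instruction := (PySem.Str.replace x "0x" "").toList
    if instruction.isEmpty then ""
    else
      let v : Nat := instruction.foldl (fun a c => 16 * a + (PySem.Int.digitVal? c).getD 0) 0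
      let bits := PySem.Int.toBinChars (v : Int)
      String.ofList (List.replicate (4 * instruction.length - bits.length) '0' ++ bits))

-- ===== PRECONDITION & SPEC =====
def pvIsHexDigit (c : Char) : Bool := c.isDigit || ('a' ≤ c && c ≤ 'f') || ('A' ≤ c && c ≤ 'F')

-- Pre_: every character left after removing "0x" is a hex digit. Exactly where A returns:
-- on any other character `int(f"0x{c}", 16)` raises ValueError.
def Pre_convert_bin (list_hex : List String) : Prop :=
  ∀ x ∈ list_hex, ((PySem.Str.replace x "0x" "").toList.all pvIsHexDigit) = true
instance (list_hex : List String) : Decidable (Pre_convert_bin list_hex) := by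
  unfold Pre_convert_bin; infer_instance
def pvWitness_convert_bin : List String := ["0xdeadBEEF", "007", "0x", ""]

def Spec_convert_bin (list_hex : List String) (out : List String) : Prop := out = convert_bin_alt list_hex
instance (list_hex : List String) (out : List String) : Decidable (Spec_convert_bin list_hex out) := by unfold Spec_convert_bin; infer_instance

-- ===== CLAIM (what is proved, stated in full; the proofs are below) =====
def Claim_equal_convert_bin : Prop := ∀ (list_hex : List String), Dom_convert_bin list_hex → Pre_convert_bin list_hex → Spec_convert_bin list_hex (convert_bin list_hex)

-- ===== LEMMAS AND PROOFS =====

-- MSB-first list of the low w bits of n.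
def pvBits : Nat → Nat → List Char
  | _, 0 => []
  | n, w + 1 => pvBits (n / 2) w ++ [Nat.digitChar (n % 2)]

theorem pvBits_zero (w : Nat) : pvBits 0 w = List.replicate w '0' := by
  induction w with
  | zero => rfl
  | succ w ih =>
    show pvBits 0 w ++ [Nat.digitChar 0] = _
    rw [ih, List.replicate_succ' (n := w)]
    rfl

-- accumulator shift for Nat.toDigitsCore at base 2
theorem toDigitsCore_acc (f n : Nat) (acc : List Char) :
    Nat.toDigitsCore 2 f n acc = Nat.toDigitsCore 2 f n [] ++ acc := by
  induction f generalizing n acc with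
  | zero => simp [Nat.toDigitsCore]
  | succ f ih =>
    simp only [Nat.toDigitsCore]
    by_cases h : n / 2 = 0
    · simp [h]
    · simp only [h]
      rw [ih (n / 2) (Nat.digitChar (n % 2) :: acc), ih (n / 2) [Nat.digitChar (n % 2)]]
      simp

-- fuel irrelevance for Nat.toDigitsCore at base 2
theorem toDigitsCore_fuel (n : Nat) : ∀ f₁ f₂ : Nat, n < f₁ → n < f₂ →
    Nat.toDigitsCore 2 f₁ n [] = Nat.toDigitsCore 2 f₂ n [] := by
  induction n using Nat.strong_induction_on with
  | _ n ih =>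
    intro f₁ f₂ h₁ h₂
    match f₁, f₂ with
    | f₁ + 1, f₂ + 1 =>
      simp only [Nat.toDigitsCore]
      by_cases h : n / 2 = 0
      · simp [h]
      · simp only [h]
        rw [toDigitsCore_acc f₁, toDigitsCore_acc f₂,
          ih (n / 2) (by omega) f₁ f₂ (by omega) (by omega)]

theorem toDigits_two_step (n : Nat) (h : 2 ≤ n) :
    Nat.toDigits 2 n = Nat.toDigits 2 (n / 2) ++ [Nat.digitChar (n % 2)] := by
  show Nat.toDigitsCore 2 (n + 1) n [] = _
  simp only [Nat.toDigitsCore]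
  have h2 : n / 2 ≠ 0 := by omega
  simp only [h2, if_false]
  rw [toDigitsCore_acc, Nat.toDigits,
    toDigitsCore_fuel (n / 2) n (n / 2 + 1) (by omega) (by omega)]

theorem toDigits_two_small (n : Nat) (h : n < 2) :
    Nat.toDigits 2 n = [Nat.digitChar n] := by
  interval_cases n <;> rfl

-- padding the binary digits of n to width w gives the low-w-bits list
theorem pvPad_eq_bits (w : Nat) : ∀ n : Nat, 0 < w → n < 2 ^ w →
    List.replicate (w - (Nat.toDigits 2 n).length) '0' ++ Nat.toDigits 2 n = pvBits n w := by
  induction w with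
  | zero => omega
  | succ w ih =>
    intro n _ hn
    by_cases hw : w = 0
    · subst hw
      have : n < 2 := by simpa using hn
      interval_cases n <;> rfl
    · by_cases hsmall : n < 2
      · rw [toDigits_two_small n hsmall]
        have hd : n / 2 = 0 := by omega
        show _ = pvBits (n / 2) w ++ [Nat.digitChar (n % 2)]
        rw [hd, pvBits_zero, Nat.mod_eq_of_lt hsmall]
        simp
      · rw [toDigits_two_step n (by omega)]
        have hn' : n / 2 < 2 ^ w := by
          have : n < 2 ^ w * 2 := by rw [pow_succ] at hn; omega
          omega
        have hrec := ih (n / 2) (by omega) hn'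
        have hlen : (Nat.toDigits 2 (n / 2)).length ≤ w :=
          Nat.toDigits_length 2 (n / 2) w (by omega) hn'
        show List.replicate (w + 1 - _) '0' ++ _ = pvBits (n / 2) w ++ [Nat.digitChar (n % 2)]
        simp only [List.length_append, List.length_singleton]
        rw [show w + 1 - ((Nat.toDigits 2 (n / 2)).length + 1)
              = w - (Nat.toDigits 2 (n / 2)).length by omega,
          ← List.append_assoc, hrec]

-- splitting off the low b bits
theorem pvBits_add (a : Nat) : ∀ (b n : Nat),
    pvBits n (a + b) = pvBits (n / 2 ^ b) a ++ pvBits (n % 2 ^ b) b := by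
  intro b
  induction b with
  | zero => simp [pvBits]
  | succ b ih =>
    intro n
    rw [show a + (b + 1) = (a + b) + 1 by omega]
    show pvBits (n / 2) (a + b) ++ [Nat.digitChar (n % 2)] = _
    rw [ih (n / 2)]
    have h1 : n / 2 / 2 ^ b = n / 2 ^ (b + 1) := by
      rw [Nat.div_div_eq_div_mul, pow_succ, mul_comm]
    have h2 : n / 2 % 2 ^ b = n % 2 ^ (b + 1) / 2 := by
      rw [pow_succ, mul_comm, Nat.mod_mul_right_div_self]
    have h3 : n % 2 ^ (b + 1) % 2 = n % 2 :=
      Nat.mod_mod_of_dvd n (dvd_pow_self 2 (by omega))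
    simp only [pvBits, h1, h2, h3, List.append_assoc]

theorem pvHexVal_lt (c : Char) (h : pvIsHexDigit c = true) :
    (PySem.Int.digitVal? c).getD 0 < 16 := by
  simp only [pvIsHexDigit, Bool.or_eq_true, Bool.and_eq_true, decide_eq_true_eq, Char.isDigit,
    ge_iff_le, Char.le_def, UInt32.le_iff_toNat_le, Char.toNat_val,
    show '0'.toNat = 48 from rfl, show '9'.toNat = 57 from rfl,
    show 'a'.toNat = 97 from rfl, show 'f'.toNat = 102 from rfl,
    show 'A'.toNat = 65 from rfl, show 'F'.toNat = 70 from rfl] at h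
  simp only [PySem.Int.digitVal?, Char.isDigit, ge_iff_le, Char.le_def, UInt32.le_iff_toNat_le,
    Char.toNat_val, show '0'.toNat = 48 from rfl, show '9'.toNat = 57 from rfl,
    show 'a'.toNat = 97 from rfl, show 'z'.toNat = 122 from rfl,
    show 'A'.toNat = 65 from rfl, show 'Z'.toNat = 90 from rfl]
  split_ifs with h1 h2 h3 <;>
    simp only [Option.getD_some, Option.getD_none, Bool.and_eq_true, decide_eq_true_eq] at * <;>
    rcases h with (h | h) | h <;> omega

-- `PySem.Int.toBinChars` on a Nat cast is `Nat.toDigits 2`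
theorem toBinChars_natCast (n : Nat) :
    PySem.Int.toBinChars ((n : Nat) : Int) = Nat.toDigits 2 n := by
  simp [PySem.Int.toBinChars]

-- the accumulated base-16 value is bounded
theorem pvVal_lt (ds : List Char) : ∀ a : Nat, (∀ c ∈ ds, pvIsHexDigit c = true) →
    ds.foldl (fun a c => 16 * a + (PySem.Int.digitVal? c).getD 0) a < 16 ^ ds.length * (a + 1) := by
  induction ds with
  | nil => intro a _; simp
  | cons c ds ih =>
    intro a h
    have hd : (PySem.Int.digitVal? c).getD 0 < 16 := pvHexVal_lt c (h c (by simp))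
    have := ih (16 * a + (PySem.Int.digitVal? c).getD 0) (fun x hx => h x (by simp [hx]))
    calc (c :: ds).foldl (fun a c => 16 * a + (PySem.Int.digitVal? c).getD 0) a
        < 16 ^ ds.length * (16 * a + (PySem.Int.digitVal? c).getD 0 + 1) := this
      _ ≤ 16 ^ ds.length * (16 * (a + 1)) := by
          apply Nat.mul_le_mul_left; omega
      _ = 16 ^ (c :: ds).length * (a + 1) := by
          simp [pow_succ]; ring

-- instruction-level agreement: A's nibble concatenation = low bits of the whole value
theorem pvInstr_eq (ds : List Char) (h : ∀ c ∈ ds, pvIsHexDigit c = true) :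
    ds.foldl (fun acc c =>
        acc ++ (List.replicate (4 - (PySem.Int.toBinChars
            (((PySem.Int.digitVal? c).getD 0 : Nat) : Int)).length) '0' ++
          PySem.Int.toBinChars (((PySem.Int.digitVal? c).getD 0 : Nat) : Int))) []
      = pvBits (ds.foldl (fun a c => 16 * a + (PySem.Int.digitVal? c).getD 0) 0)
          (4 * ds.length) := by
  induction ds using List.reverseRecOn with
  | nil => rfl
  | append_singleton ds c ih =>
    have hds : ∀ x ∈ ds, pvIsHexDigit x = true := fun x hx => h x (by simp [hx])
    have hc : (PySem.Int.digitVal? c).getD 0 < 16 := pvHexVal_lt c (h c (by simp))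
    rw [List.foldl_append, List.foldl_append, ih hds]
    have hnib : ∀ d : Nat, d < 16 →
        List.replicate (4 - (PySem.Int.toBinChars ((d : Nat) : Int)).length) '0' ++
        PySem.Int.toBinChars ((d : Nat) : Int) = pvBits d 4 := by
      intro d hd
      rw [toBinChars_natCast]
      exact pvPad_eq_bits 4 d (by omega) (by omega)
    simp only [List.foldl_cons, List.foldl_nil, hnib _ hc]
    have h16 : (2 : Nat) ^ 4 = 16 := by norm_num
    rw [show 4 * (ds ++ [c]).length = 4 * ds.length + 4 by simp [Nat.mul_add],
      pvBits_add (4 * ds.length) 4, h16,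
      Nat.mul_add_div (by omega) _ _, Nat.div_eq_of_lt hc,
      Nat.mul_add_mod, Nat.mod_eq_of_lt hc, Nat.add_zero]

-- per-string agreement, stated over the already-stripped character list
theorem pvString_eq (ds : List Char) (h : ∀ c ∈ ds, pvIsHexDigit c = true) :
    String.ofList (ds.foldl (fun acc algarismo =>
      acc ++ (List.replicate (4 - (PySem.Int.toBinChars
          (((PySem.Int.digitVal? algarismo).getD 0 : Nat) : Int)).length) '0' ++
        PySem.Int.toBinChars (((PySem.Int.digitVal? algarismo).getD 0 : Nat) : Int))) [])
    = (if ds.isEmpty then ""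
       else String.ofList (List.replicate (4 * ds.length -
           (PySem.Int.toBinChars
             ((ds.foldl (fun a c => 16 * a + (PySem.Int.digitVal? c).getD 0) 0 : Nat) : Int)).length) '0' ++
         PySem.Int.toBinChars
           ((ds.foldl (fun a c => 16 * a + (PySem.Int.digitVal? c).getD 0) 0 : Nat) : Int))) := by
  by_cases hempty : ds.isEmpty
  · have hnil : ds = [] := List.isEmpty_iff.mp hempty
    subst hnil
    rfl
  · have hne : ds ≠ [] := by simp [List.isEmpty_iff] at hempty; exact hempty
    have hlen : 0 < ds.length := List.length_pos_iff.mpr hne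
    simp only [hempty, Bool.false_eq_true, if_false]
    rw [pvInstr_eq ds h, toBinChars_natCast]
    congr 1
    have hv : ds.foldl (fun a c => 16 * a + (PySem.Int.digitVal? c).getD 0) 0
        < 2 ^ (4 * ds.length) := by
      have := pvVal_lt ds 0 h
      have h16 : (16 : Nat) ^ ds.length = 2 ^ (4 * ds.length) := by
        rw [show (16 : Nat) = 2 ^ 4 from rfl, ← pow_mul]
      omega
    exact (pvPad_eq_bits (4 * ds.length)
      (ds.foldl (fun a c => 16 * a + (PySem.Int.digitVal? c).getD 0) 0) (by omega) hv).symm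

-- ===== VERDICT (by name: the statement is the Claim_ definition above) =====
theorem convert_bin_spec : Claim_equal_convert_bin := by
  intro list_hex _ hpre
  show convert_bin list_hex = convert_bin_alt list_hex
  simp only [convert_bin, convert_bin_alt]
  rw [PySem.List.foldl_append_singleton_eq_map, List.map_map]
  apply List.map_congr_left
  intro x hx
  have h : ∀ c ∈ (PySem.Str.replace x "0x" "").toList, pvIsHexDigit c = true := by
    simpa [List.all_eq_true] using hpre x hx
  exact pvString_eq (PySem.Str.replace x "0x" "").toList h
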